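-- pv_equiv track=rewrite | github.com/random-droid/dev-caddie | cloudrun/services/lecture_service.py | _extract_title_summary
-- ===== SOURCE A (Python) =====
-- def _extract_title_summary(text: str):
--     """Extract title and summary from markdown notes."""
--     title = "Unknown Title"
--     summary = ""
--     lines = text.split('\n')
--
--     # Extract title
--     for line in lines:
--         if line.startswith('# '):
--             title = line[2:].strip()
--             break
--         elif line.startswith('**Title'):
--             title = line.split(':', 1)[1].strip()
--             break
--
--     # Extract summary: first non-empty paragraph after title
--     in_content = False
--     summary_lines = []
--     for line in lines:
--         stripped = line.strip()
--         # Skip title lines and empty lines at start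
--         if stripped.startswith('#') or stripped.startswith('**Title'):
--             in_content = True
--             continue
--         if not in_content:
--             continue
--         # Skip section headers
--         if stripped.startswith('#') or stripped.startswith('**'):
--             if summary_lines:
--                 break
--             continue
--         # Collect content lines
--         if stripped:
--             summary_lines.append(stripped)
--             if len(summary_lines) >= 3:  # Get first ~3 lines for summary
--                 break
--
--     if summary_lines:
--         summary = ' '.join(summary_lines)[:500]  # Limit to 500 chars
--
--     return title, summary
-- ===== SOURCE B (Python) =====
-- def _update_title(title, line):
--     """Title lock: keep an already-found title, else try the two title rules on this line."""
--     if title is not None: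
--         return title
--     if line.startswith('# '):
--         return line[2:].strip()
--     if line.startswith('**Title'):
--         return line.split(':', 1)[1].strip()
--     return None
--
-- def _step_summary(state, line):
--     """Summary state machine: (in_content, parts, done) -> next state for one line."""
--     in_content, parts, done = state
--     if done:
--         return state
--     s = line.strip()
--     if s.startswith('#') or s.startswith('**Title'):
--         return (True, parts, False)
--     if not in_content:
--         return state
--     if s.startswith('**'):
--         return (in_content, parts, bool(parts))
--     if s:
--         return (in_content, parts + [s], len(parts) + 1 >= 3)
--     return state
--
-- def _extract_title_summary(text: str):
--     """Single pass over the lines; the title lock and the summary machine run side by side."""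
--     title, state = None, (False, [], False)
--     for line in text.split('\n'):
--         title = _update_title(title, line)
--         state = _step_summary(state, line)
--     parts = state[1]
--     return (title if title is not None else "Unknown Title",
--             ' '.join(parts)[:500] if parts else "")
-- ===== Notes on version B (the rewrite author's own statement) =====
-- stated objective: alternative
-- what changed: A's two sequential scans over the lines (a title loop with breaks, then a separate summary loop with an in_content flag) are fused into a single pass driven by two small pure step functions: a title lock and a (in_content, parts, done) summary state machine folded over the lines.
import Mathlib
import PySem

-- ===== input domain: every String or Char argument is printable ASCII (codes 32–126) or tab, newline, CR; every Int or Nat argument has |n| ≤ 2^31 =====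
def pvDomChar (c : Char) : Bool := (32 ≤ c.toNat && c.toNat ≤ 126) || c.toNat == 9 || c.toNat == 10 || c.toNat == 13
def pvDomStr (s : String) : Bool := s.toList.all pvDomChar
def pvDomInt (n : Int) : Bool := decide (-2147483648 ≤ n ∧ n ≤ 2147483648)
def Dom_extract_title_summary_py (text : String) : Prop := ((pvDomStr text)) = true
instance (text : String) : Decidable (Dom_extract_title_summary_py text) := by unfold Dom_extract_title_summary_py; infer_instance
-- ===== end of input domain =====

-- B fuses A's two sequential loops into one pass driven by two small step functions
-- (title lock + summary state machine); same return value, no speed claim (alternative decomposition).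

-- shared by both ports and Pre_: text.split('\n') (sep is non-empty, so split? never returns none)
def pvLines (text : String) : List String := (PySem.Str.split? text "\n").getD []

-- ===== PORT A =====
-- A's first loop (title scan).  Where Python would raise IndexError (a '**Title' line
-- without ':'), the port uses `[1]?.getD ""`; those inputs are excluded by Pre_ below.
def pvATitle : List String → String
  | [] => "Unknown Title"
  | l :: ls =>
    if PySem.Str.startswith l "# " then PySem.Str.strip (PySem.Str.slice l (some 2) none)
    else if PySem.Str.startswith l "**Title" then
      PySem.Str.strip ((((PySem.Str.splitMax? l ":" 1).getD [])[1]?).getD "")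
    else pvATitle ls

-- A's second loop (summary scan with in_content flag and the two `break`s).
def pvASum : List String → Bool → List String → List String
  | [], _, acc => acc
  | l :: ls, ic, acc =>
    let s := PySem.Str.strip l
    if PySem.Str.startswith s "#" || PySem.Str.startswith s "**Title" then pvASum ls true acc
    else if !ic then pvASum ls ic acc
    else if PySem.Str.startswith s "#" || PySem.Str.startswith s "**" then
      (if acc ≠ [] then acc else pvASum ls ic acc)
    else if s ≠ "" then
      (let acc' := acc ++ [s]
       if 3 ≤ acc'.length then acc' else pvASum ls ic acc')
    else pvASum ls ic acc

def extract_title_summary_py (text : String) : String × String :=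
  let lines := pvLines text
  let title := pvATitle lines
  let sl := pvASum lines false []
  let summary := if sl ≠ [] then PySem.Str.slice (PySem.Str.join " " sl) none (some 500) else ""
  (title, summary)

-- ===== PORT B =====
-- Source B's _update_title (same IndexError corner handled with `[1]?.getD ""`, excluded by Pre_).
def pvBTitle (t : Option String) (l : String) : Option String :=
  match t with
  | some x => some x
  | none =>
    if PySem.Str.startswith l "# " then some (PySem.Str.strip (PySem.Str.slice l (some 2) none))
    else if PySem.Str.startswith l "**Title" then
      some (PySem.Str.strip ((((PySem.Str.splitMax? l ":" 1).getD [])[1]?).getD ""))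
    else none

-- Source B's _step_summary.
def pvBSum (st : Bool × List String × Bool) (l : String) : Bool × List String × Bool :=
  let (ic, parts, done) := st
  if done then (ic, parts, done)
  else
    let s := PySem.Str.strip l
    if PySem.Str.startswith s "#" || PySem.Str.startswith s "**Title" then (true, parts, false)
    else if !ic then (ic, parts, done)
    else if PySem.Str.startswith s "**" then (ic, parts, decide (parts ≠ []))
    else if s ≠ "" then (ic, parts ++ [s], decide (3 ≤ parts.length + 1))
    else (ic, parts, done)

def extract_title_summary_py_alt (text : String) : String × String :=
  let r := (pvLines text).foldl
    (fun (p : Option String × (Bool × List String × Bool)) l => (pvBTitle p.1 l, pvBSum p.2 l))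
    (none, (false, [], false))
  let parts := r.2.2.1
  (r.1.getD "Unknown Title",
   if parts ≠ [] then PySem.Str.slice (PySem.Str.join " " parts) none (some 500) else "")

-- ===== PRECONDITION & SPEC =====
-- Pre_ excludes exactly the texts on which Python A raises IndexError: a line starting with
-- '**Title' but containing no ':' that the title scan reaches (no earlier '# '/'**Title' line).
def Pre_extract_title_summary_py (text : String) : Prop :=
  ∀ i : Fin (pvLines text).length,
    (PySem.Str.startswith ((pvLines text).get i) "**Title" = true ∧
      ∀ j : Fin (pvLines text).length, j.val < i.val →
        ¬(PySem.Str.startswith ((pvLines text).get j) "# " = true ∨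
          PySem.Str.startswith ((pvLines text).get j) "**Title" = true)) →
    PySem.Str.isIn ":" ((pvLines text).get i) = true
instance (text : String) : Decidable (Pre_extract_title_summary_py text) := by
  unfold Pre_extract_title_summary_py; infer_instance

def pvWitness_extract_title_summary_py : String := "# T\n\nhello world"

def Spec_extract_title_summary_py (text : String) (out : String × String) : Prop := out = extract_title_summary_py_alt text
instance (text : String) (out : String × String) : Decidable (Spec_extract_title_summary_py text out) := by unfold Spec_extract_title_summary_py; infer_instance

-- ===== CLAIM (what is proved, stated in full; the proofs are below) =====
def Claim_equal_extract_title_summary_py : Prop := ∀ (text : String), Dom_extract_title_summary_py text → Pre_extract_title_summary_py text → Spec_extract_title_summary_py text (extract_title_summary_py text)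

-- ===== LEMMAS AND PROOFS =====

-- a locked title stays locked through the rest of B's fold
theorem pvBTitle_locked (ls : List String) (x : String) :
    ls.foldl pvBTitle (some x) = some x := by
  induction ls with
  | nil => rfl
  | cons l ls ih => simpa [pvBTitle] using ih

-- A's title loop equals B's title fold started unlocked
theorem pvTitle_eq (ls : List String) :
    pvATitle ls = (ls.foldl pvBTitle none).getD "Unknown Title" := by
  induction ls with
  | nil => rfl
  | cons l ls ih =>
    simp only [pvATitle, pvBTitle, List.foldl_cons]
    split_ifs <;> simp [pvBTitle_locked, ih]

-- once done, B's summary machine is frozen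
theorem pvBSum_done (ls : List String) (ic : Bool) (parts : List String) :
    ls.foldl pvBSum (ic, parts, true) = (ic, parts, true) := by
  induction ls with
  | nil => rfl
  | cons l ls ih => simpa [pvBSum] using ih

-- A's summary loop equals the parts component of B's summary fold (done = false)
theorem pvSum_eq (ls : List String) : ∀ (ic : Bool) (parts : List String),
    pvASum ls ic parts = (ls.foldl pvBSum (ic, parts, false)).2.1 := by
  induction ls with
  | nil => intro ic parts; rfl
  | cons l ls ih =>
    intro ic parts
    simp only [pvASum, pvBSum, List.foldl_cons]
    split_ifs <;> (try simp_all [pvBSum_done, PySem.Chars.startswith]) <;>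
      · have hd : ¬ (2 ≤ parts.length) := by omega
        simp [hd]

-- B's fused fold is the pair of the two independent folds
theorem pvFold_split (ls : List String) (t : Option String) (q : Bool × List String × Bool) :
    ls.foldl (fun (p : Option String × (Bool × List String × Bool)) l => (pvBTitle p.1 l, pvBSum p.2 l)) (t, q)
      = (ls.foldl pvBTitle t, ls.foldl pvBSum q) := by
  induction ls generalizing t q with
  | nil => rfl
  | cons l ls ih => simp [List.foldl, ih]

-- ===== VERDICT (by name: the statement is the Claim_ definition above) =====
theorem extract_title_summary_py_spec : Claim_equal_extract_title_summary_py := by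
  intro text _ _
  unfold Spec_extract_title_summary_py extract_title_summary_py extract_title_summary_py_alt
  simp only [pvFold_split, pvTitle_eq, pvSum_eq]
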